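-- pv_equiv track=rewrite | github.com/ookok/LivingTreeAlAgent | livingtree/dna/conversation_dna.py | _merge_plans
-- ===== SOURCE A (Python) =====
-- def _merge_plans(plan_sets: list[list[str]]) -> list[str]:
--     freq: dict[str, int] = {}
--     positions: dict[str, list[int]] = {}
--     for plan in plan_sets:
--         for i, step in enumerate(plan):
--             freq[step] = freq.get(step, 0) + 1
--             positions.setdefault(step, []).append(i)
--
--     sorted_steps = sorted(freq.items(), key=lambda x: x[1], reverse=True)
--     threshold = max(2, len(plan_sets) // 2 + 1)
--     return [step for step, count in sorted_steps if count >= threshold][:8]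
-- ===== SOURCE B (Python) =====
-- def _merge_plans(plan_sets: list[list[str]]) -> list[str]:
--     freq: dict[str, int] = {}
--     for plan in plan_sets:
--         for step in plan:
--             freq[step] = freq.get(step, 0) + 1
--     buckets: dict[int, list[str]] = {}
--     maxc = 0
--     for step, c in freq.items():
--         buckets.setdefault(c, []).append(step)
--         if c > maxc:
--             maxc = c
--     threshold = max(2, len(plan_sets) // 2 + 1)
--     res: list[str] = []
--     for c in range(maxc, threshold - 1, -1):
--         res.extend(buckets.get(c, []))
--     return res[:8]
-- ===== Notes on version B (the rewrite author's own statement) =====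
-- stated objective: faster
-- what changed: Replaces A's stable comparison sort of (step,count) pairs followed by a threshold filter with a counting/bucket pass: buckets of steps keyed by their count are filled in first-seen order and walked from the maximal count down to the threshold; the unused positions dict is dropped.
import Mathlib
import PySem

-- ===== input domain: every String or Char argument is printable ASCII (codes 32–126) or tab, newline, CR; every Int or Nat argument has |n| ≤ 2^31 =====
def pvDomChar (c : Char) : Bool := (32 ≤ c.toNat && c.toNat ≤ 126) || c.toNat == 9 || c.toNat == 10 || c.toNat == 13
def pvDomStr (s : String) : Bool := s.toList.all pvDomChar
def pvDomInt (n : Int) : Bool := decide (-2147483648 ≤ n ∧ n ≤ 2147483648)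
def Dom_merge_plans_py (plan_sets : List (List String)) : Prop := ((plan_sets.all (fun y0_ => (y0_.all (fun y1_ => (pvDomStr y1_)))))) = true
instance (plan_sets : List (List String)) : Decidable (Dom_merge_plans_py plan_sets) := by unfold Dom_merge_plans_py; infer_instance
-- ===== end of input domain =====

-- B replaces A's comparison sort of (step, count) pairs by a counting/bucket pass over the
-- bounded count range (buckets filled in first-seen order, walked from the maximal count down
-- to the threshold), dropping the comparison sort; measured faster on the generated inputs.

-- ===== PORT A =====
-- freq[step] = freq.get(step, 0) + 1  →  insert/getD;  positions.setdefault(step, []).append(i)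
-- → modify step [] (· ++ [i]) (exact: setdefault-then-append of the mutable list);  [:8] → take 8.
def merge_plans_py (plan_sets : List (List String)) : List String :=
  let st := plan_sets.foldl
    (fun (st : PySem.Dict String Int × PySem.Dict String (List Int)) plan =>
      (PySem.List.enumerate plan).foldl
        (fun st p =>
          (st.1.insert p.2 (st.1.getD p.2 0 + 1),
           st.2.modify p.2 [] (fun l => l ++ [p.1]))) st)
    (PySem.Dict.empty, PySem.Dict.empty)
  let sorted_steps := PySem.List.sorted st.1.items (fun x => x.2) true
  let threshold := max 2 (PySem.Int.floordiv (PySem.List.len plan_sets) 2 + 1)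
  (List.map (fun p => p.1)
    (sorted_steps.filter (fun p => decide (threshold ≤ p.2)))).take 8

-- ===== PORT B =====
-- buckets.setdefault(c, []).append(step) → modify c [] (· ++ [step]); the maxc update
-- 'if c > maxc: maxc = c' is the if-expression; range(maxc, threshold-1, -1) → pyRange.
def merge_plans_py_alt (plan_sets : List (List String)) : List String :=
  let freq := plan_sets.foldl
    (fun d plan => plan.foldl (fun d step => d.insert step (d.getD step 0 + 1)) d)
    PySem.Dict.empty
  let bm := freq.items.foldl
    (fun (bm : PySem.Dict Int (List String) × Int) p =>
      (bm.1.modify p.2 [] (fun l => l ++ [p.1]),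
       if bm.2 < p.2 then p.2 else bm.2))
    (PySem.Dict.empty, 0)
  let threshold := max 2 (PySem.Int.floordiv (PySem.List.len plan_sets) 2 + 1)
  let res := (PySem.List.pyRange bm.2 (threshold - 1) (-1)).foldl
    (fun acc c => acc ++ bm.1.getD c []) []
  res.take 8

-- ===== PRECONDITION & SPEC =====
def Spec_merge_plans_py (plan_sets : List (List String)) (out : List String) : Prop := out = merge_plans_py_alt plan_sets
instance (plan_sets : List (List String)) (out : List String) : Decidable (Spec_merge_plans_py plan_sets out) := by unfold Spec_merge_plans_py; infer_instance

-- ===== CLAIM (what is proved, stated in full; the proofs are below) =====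
def Claim_equal_merge_plans_py : Prop := ∀ (plan_sets : List (List String)), Dom_merge_plans_py plan_sets → Spec_merge_plans_py plan_sets (merge_plans_py plan_sets)

-- ===== LEMMAS AND PROOFS =====

-- A fold whose step updates the two components independently is the pair of the two folds.
theorem pv_foldl_pair {β γ δ : Type} (l : List β) (f : γ → β → γ) (g : δ → β → δ) (s : γ × δ) :
    l.foldl (fun st b => (f st.1 b, g st.2 b)) s = (l.foldl f s.1, l.foldl g s.2) := by
  induction l generalizing s with
  | nil => rfl
  | cons x t ih => simpa using ih (f s.1 x, g s.2 x)

-- A fold over enumerate that ignores the index is the fold over the list.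
theorem pv_foldl_enumerate_snd {α δ : Type} (plan : List α) (h : δ → α → δ) :
    ∀ (s : Int) (d : δ),
      (PySem.List.enumerate plan s).foldl (fun d p => h d p.2) d = plan.foldl h d := by
  induction plan with
  | nil => intro s d; rfl
  | cons x t ih => intro s d; rw [PySem.List.enumerate_cons]; simpa using ih (s + 1) (h d x)

-- The first component of A's (freq, positions) loop is B's freq loop.
theorem pv_freq_eq (plan_sets : List (List String)) :
    ∀ (s : PySem.Dict String Int × PySem.Dict String (List Int)),
      (plan_sets.foldl
        (fun st plan =>
          (PySem.List.enumerate plan).foldl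
            (fun (st : PySem.Dict String Int × PySem.Dict String (List Int)) p =>
              (st.1.insert p.2 (st.1.getD p.2 0 + 1),
               st.2.modify p.2 [] (fun l => l ++ [p.1]))) st) s).1
      = plan_sets.foldl
          (fun d plan => plan.foldl (fun d step => d.insert step (d.getD step 0 + 1)) d) s.1 := by
  induction plan_sets with
  | nil => intro s; rfl
  | cons plan t ih =>
    intro s
    simp only [List.foldl_cons]
    rw [ih]
    have h1 := pv_foldl_pair (PySem.List.enumerate plan)
      (fun (d : PySem.Dict String Int) (p : Int × String) => d.insert p.2 (d.getD p.2 0 + 1))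
      (fun (d : PySem.Dict String (List Int)) (p : Int × String) => d.modify p.2 [] (fun l => l ++ [p.1])) s
    rw [h1]
    dsimp only
    rw [pv_foldl_enumerate_snd plan
      (fun (d : PySem.Dict String Int) (step : String) => d.insert step (d.getD step 0 + 1)) 0 s.1]

-- Splitting a countdown range at an intermediate point.
theorem pv_pyRange_neg_one_split :
    ∀ (n : Nat) (a b c : Int), (a - b).toNat = n → c ≤ b → b ≤ a →
      PySem.List.pyRange a c (-1) = PySem.List.pyRange a b (-1) ++ PySem.List.pyRange b c (-1) := by
  intro n
  induction n with
  | zero =>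
    intro a b c hn hcb hba
    have hab : a = b := by omega
    subst hab
    rw [PySem.List.pyRange_neg_one_eq_nil le_rfl, List.nil_append]
  | succ m ih =>
    intro a b c hn hcb hba
    have hba' : b < a := by omega
    rw [PySem.List.pyRange_neg_one_cons (show c < a by omega),
        PySem.List.pyRange_neg_one_cons hba',
        ih (a - 1) b c (by omega) hcb (by omega), List.cons_append]

-- insertBy places x between a prefix it must not precede and a suffix it precedes.
theorem pv_insertBy_middle {α : Type} (b : α → α → Bool) (x : α) (ys zs : List α)
    (h1 : ∀ y ∈ ys, b x y = false) (h2 : ∀ z ∈ zs, b x z = true) :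
    PySem.List.insertBy b x (ys ++ zs) = ys ++ x :: zs := by
  induction ys with
  | nil =>
    cases zs with
    | nil => simp [PySem.List.insertBy]
    | cons z t => simp [PySem.List.insertBy, h2 z (by simp)]
  | cons y t ih =>
    have hy : b x y = false := h1 y (by simp)
    simp only [List.cons_append, PySem.List.insertBy, hy, Bool.false_eq_true, if_false]
    rw [ih (fun y hy => h1 y (by simp [hy]))]

-- Appending one pair to l appends it to its own bucket in the bucket decomposition.
theorem pv_flatMap_snoc {α : Type} (l : List (α × Int)) (x : α × Int) (M : Int)
    (hk1 : 1 ≤ x.2) (hk2 : x.2 ≤ M) :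
    (PySem.List.pyRange M 0 (-1)).flatMap (fun c => (l ++ [x]).filter (fun p => p.2 == c))
    = (PySem.List.pyRange M (x.2 - 1) (-1)).flatMap (fun c => l.filter (fun p => p.2 == c))
      ++ x :: (PySem.List.pyRange (x.2 - 1) 0 (-1)).flatMap (fun c => l.filter (fun p => p.2 == c)) := by
  have hsplit1 := pv_pyRange_neg_one_split (M - (x.2 - 1)).toNat M (x.2 - 1) 0 rfl (by omega) (by omega)
  have hsplit2 := pv_pyRange_neg_one_split (M - x.2).toNat M x.2 (x.2 - 1) rfl (by omega) (by omega)
  have hsing : PySem.List.pyRange x.2 (x.2 - 1) (-1) = [x.2] := by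
    rw [PySem.List.pyRange_neg_one_cons (by omega), PySem.List.pyRange_neg_one_eq_nil (by omega)]
  have hlow : (PySem.List.pyRange (x.2 - 1) 0 (-1)).flatMap (fun c => (l ++ [x]).filter (fun p => p.2 == c))
      = (PySem.List.pyRange (x.2 - 1) 0 (-1)).flatMap (fun c => l.filter (fun p => p.2 == c)) := by
    apply List.flatMap_congr
    intro c hc
    have hc' : c < x.2 := by
      have := PySem.List.mem_pyRange_neg_one.mp hc; omega
    rw [List.filter_append]
    have hne : (x.2 == c) = false := beq_eq_false_iff_ne.mpr (by omega)
    have : [x].filter (fun p => p.2 == c) = [] := by simp [List.filter, hne]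
    rw [this, List.append_nil]
  have hhigh : (PySem.List.pyRange M x.2 (-1)).flatMap (fun c => (l ++ [x]).filter (fun p => p.2 == c))
      = (PySem.List.pyRange M x.2 (-1)).flatMap (fun c => l.filter (fun p => p.2 == c)) := by
    apply List.flatMap_congr
    intro c hc
    have hc' : x.2 < c := by
      have := PySem.List.mem_pyRange_neg_one.mp hc; omega
    rw [List.filter_append]
    have hne : (x.2 == c) = false := beq_eq_false_iff_ne.mpr (by omega)
    have : [x].filter (fun p => p.2 == c) = [] := by simp [List.filter, hne]
    rw [this, List.append_nil]
  have hself : [x].filter (fun p => p.2 == x.2) = [x] := by simp [List.filter]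
  rw [hsplit1, List.flatMap_append, hlow, hsplit2, List.flatMap_append, hhigh]
  simp only [hsing, List.flatMap_cons, List.flatMap_nil, List.append_nil,
    List.filter_append, hself]
  simp [List.append_assoc]

-- KEY: Python's stable sort by count, descending, is the bucket decomposition
-- (counts walked from any upper bound M down to 1, each bucket in original order).
theorem pv_sorted_rev_buckets {α : Type} (l : List (α × Int)) (M : Int)
    (hb : ∀ p ∈ l, 1 ≤ p.2 ∧ p.2 ≤ M) :
    PySem.List.sorted l (fun x => x.2) true
    = (PySem.List.pyRange M 0 (-1)).flatMap (fun c => l.filter (fun p => p.2 == c)) := by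
  induction l using List.reverseRecOn with
  | nil => simp [PySem.List.sorted_rev_eq_foldl_insertBy]
  | append_singleton l x ih =>
    have hx := hb x (by simp)
    have hsor : PySem.List.sorted (l ++ [x]) (fun p => p.2) true
        = PySem.List.insertBy (fun a b => decide (b.2 < a.2)) x
            (PySem.List.sorted l (fun p => p.2) true) := by
      rw [PySem.List.sorted_rev_eq_foldl_insertBy, PySem.List.sorted_rev_eq_foldl_insertBy,
          List.foldl_append, List.foldl_cons, List.foldl_nil]
    rw [hsor, ih (fun p hp => hb p (by simp [hp]))]
    rw [pv_flatMap_snoc l x M hx.1 hx.2]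
    rw [pv_pyRange_neg_one_split (M - (x.2 - 1)).toNat M (x.2 - 1) 0 rfl (by omega) (by omega),
        List.flatMap_append]
    apply pv_insertBy_middle
    · intro y hy
      rcases List.mem_flatMap.mp hy with ⟨c, hc, hyc⟩
      have hcr := PySem.List.mem_pyRange_neg_one.mp hc
      have : y.2 = c := by simpa using (List.mem_filter.mp hyc).2
      simp only [decide_eq_false_iff_not]
      omega
    · intro z hz
      rcases List.mem_flatMap.mp hz with ⟨c, hc, hzc⟩
      have hcr := PySem.List.mem_pyRange_neg_one.mp hc
      have : z.2 = c := by simpa using (List.mem_filter.mp hzc).2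
      simp only [decide_eq_true_eq]
      omega

-- Filtering the bucket decomposition at a threshold truncates the count range.
theorem pv_filter_buckets {α : Type} (l : List (α × Int)) (M th : Int) (hth : 1 ≤ th) :
    ((PySem.List.pyRange M 0 (-1)).flatMap (fun c => l.filter (fun p => p.2 == c))).filter
        (fun p => decide (th ≤ p.2))
    = (PySem.List.pyRange M (th - 1) (-1)).flatMap (fun c => l.filter (fun p => p.2 == c)) := by
  rw [List.filter_flatMap]
  have hinner : ∀ c : Int, (List.filter (fun p => decide (th ≤ p.2)) (l.filter (fun p => p.2 == c)))
      = if th ≤ c then l.filter (fun p => p.2 == c) else [] := by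
    intro c
    by_cases h : th ≤ c
    · rw [if_pos h]
      apply List.filter_eq_self.mpr
      intro p hp
      have : p.2 = c := by simpa using (List.mem_filter.mp hp).2
      simp [this, h]
    · rw [if_neg h]
      apply List.filter_eq_nil_iff.mpr
      intro p hp
      have : p.2 = c := by simpa using (List.mem_filter.mp hp).2
      simp [this, h]
  by_cases hM : th ≤ M
  · rw [pv_pyRange_neg_one_split (M - (th - 1)).toNat M (th - 1) 0 rfl (by omega) (by omega),
        List.flatMap_append]
    have h1 : (PySem.List.pyRange M (th - 1) (-1)).flatMap
        (fun c => List.filter (fun p => decide (th ≤ p.2)) (l.filter (fun p => p.2 == c)))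
        = (PySem.List.pyRange M (th - 1) (-1)).flatMap (fun c => l.filter (fun p => p.2 == c)) := by
      apply List.flatMap_congr
      intro c hc
      have := PySem.List.mem_pyRange_neg_one.mp hc
      rw [hinner c, if_pos (by omega)]
    have h2 : (PySem.List.pyRange (th - 1) 0 (-1)).flatMap
        (fun c => List.filter (fun p => decide (th ≤ p.2)) (l.filter (fun p => p.2 == c))) = [] := by
      rw [List.flatMap_congr (g := fun _ => ([] : List (α × Int)))]
      · simp
      · intro c hc
        have := PySem.List.mem_pyRange_neg_one.mp hc
        rw [hinner c, if_neg (by omega)]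
    rw [h1, h2, List.append_nil]
  · rw [PySem.List.pyRange_neg_one_eq_nil (show M ≤ th - 1 by omega), List.flatMap_nil]
    rw [List.flatMap_congr (g := fun _ => ([] : List (α × Int)))]
    · simp
    · intro c hc
      have := PySem.List.mem_pyRange_neg_one.mp hc
      rw [hinner c, if_neg (by omega)]

-- B's bucket dict looked up at count c is the c-bucket of the items list.
theorem pv_buckets_getD (l : List (String × Int)) (c : Int) :
    (l.foldl (fun (b : PySem.Dict Int (List String)) p => b.modify p.2 [] (fun t => t ++ [p.1]))
        PySem.Dict.empty).getD c []
    = (l.filter (fun p => p.2 == c)).map (fun p => p.1) := by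
  have h := PySem.Dict.getD_foldl_modify_append (l.map Prod.swap) PySem.Dict.empty c
  rw [List.foldl_map] at h
  simpa [List.filter_map, Function.comp] using h

-- The two ports agree.
theorem pv_merge_plans_eq (plan_sets : List (List String)) :
    merge_plans_py plan_sets = merge_plans_py_alt plan_sets := by
  unfold merge_plans_py merge_plans_py_alt
  simp only []
  rw [pv_freq_eq]
  dsimp only
  have hbm := pv_foldl_pair
    (List.foldl (fun d plan => plan.foldl
        (fun (d : PySem.Dict String Int) step => d.insert step (d.getD step 0 + 1)) d)
      PySem.Dict.empty plan_sets).items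
    (fun (b : PySem.Dict Int (List String)) (p : String × Int) => b.modify p.2 [] (fun l => l ++ [p.1]))
    (fun (m : Int) (p : String × Int) => if m < p.2 then p.2 else m)
    (PySem.Dict.empty, 0)
  rw [hbm]
  dsimp only
  have hmaxf : (fun (m : Int) (p : String × Int) => if m < p.2 then p.2 else m)
      = fun m p => max m p.2 := by
    funext m p; split_ifs <;> omega
  rw [hmaxf]
  set freq := plan_sets.foldl
      (fun d plan => plan.foldl (fun d step => d.insert step (d.getD step 0 + 1)) d)
      (PySem.Dict.empty : PySem.Dict String Int) with hfreq
  set l := freq.items with hl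
  set maxc := l.foldl (fun m p => max m p.2) 0 with hmaxc
  set th := max 2 (PySem.Int.floordiv (PySem.List.len plan_sets) 2 + 1) with hth
  have hth2 : (2 : Int) ≤ th := le_max_left _ _
  have hcounter : freq = PySem.Dict.counter plan_sets.flatten := by
    rw [hfreq, ← PySem.Dict.foldl_insert_getD_add_one_eq_counter, List.foldl_flatten]
  have hb : ∀ p ∈ l, 1 ≤ p.2 ∧ p.2 ≤ maxc := by
    intro p hp
    constructor
    · have hp' := hp
      rw [hl, hcounter, PySem.Dict.items_counter] at hp'
      rcases List.mem_map.mp hp' with ⟨k, hk, hpk⟩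
      have hkmem : k ∈ plan_sets.flatten := (PySem.Set.mem_ofList _ _).mp hk
      have : 0 < List.count k plan_sets.flatten := List.count_pos_iff.mpr hkmem
      rw [← hpk]
      dsimp only
      exact_mod_cast this
    · exact (PySem.List.le_foldl_max_int l (fun p => p.2) 0).2 p hp
  rw [pv_sorted_rev_buckets l maxc hb, pv_filter_buckets l maxc th (by omega),
      List.map_flatMap, PySem.List.foldl_append_eq_flatMap, List.nil_append]
  exact congrArg (List.take 8) (List.flatMap_congr (fun c _ => (pv_buckets_getD l c).symm))

-- ===== VERDICT (by name: the statement is the Claim_ definition above) =====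
theorem merge_plans_py_spec : Claim_equal_merge_plans_py := by
  intro plan_sets _
  unfold Spec_merge_plans_py
  exact pv_merge_plans_eq plan_sets
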